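-- pv_equiv track=rewrite | github.com/Onselius/adventofcode | 18/2dec.py | check_characters
-- ===== SOURCE A (Python) =====
-- def check_characters(line, number):
--     my_dict = {}
--     for char in line:
--         my_dict.setdefault(char, 0)
--         my_dict[char] = my_dict[char] + 1
--     if number in my_dict.values():
--         return 1
--     return 0
-- ===== SOURCE B (Python) =====
-- def check_characters(line, number):
--     # sort-and-scan: equal characters become contiguous runs in sorted order;
--     # walk once keeping only the current run length, no frequency table.
--     s = sorted(line)
--     run = 0
--     for i, ch in enumerate(s):
--         run += 1
--         if i + 1 == len(s) or s[i + 1] != ch: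
--             if run == number:
--                 return 1
--             run = 0
--     return 0
-- ===== Notes on version B (the rewrite author's own statement) =====
-- stated objective: alternative
-- what changed: B sorts the characters and scans the sorted sequence once, maintaining only the current run length and returning 1 when a run boundary closes a run of the requested length; A builds a full frequency dictionary and tests membership of number in its values.
import Mathlib
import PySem

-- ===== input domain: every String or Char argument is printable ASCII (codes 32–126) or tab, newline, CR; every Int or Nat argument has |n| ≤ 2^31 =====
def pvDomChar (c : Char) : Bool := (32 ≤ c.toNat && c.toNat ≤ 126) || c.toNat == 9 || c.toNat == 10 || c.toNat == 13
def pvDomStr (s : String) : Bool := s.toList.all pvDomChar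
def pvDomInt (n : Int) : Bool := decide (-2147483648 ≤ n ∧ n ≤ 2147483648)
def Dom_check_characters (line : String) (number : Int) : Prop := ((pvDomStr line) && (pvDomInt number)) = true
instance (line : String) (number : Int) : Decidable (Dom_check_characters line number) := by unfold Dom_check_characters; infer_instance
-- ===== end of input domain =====

-- B sorts the characters and scans once, keeping only the current run length;
-- A builds a frequency dictionary. Alternative decomposition, no speed claim.

-- ===== PORT A =====
def check_characters (line : String) (number : Int) : Int :=
  let d := line.toList.foldl
    (fun d char =>
      let d := PySem.Dict.setdefault d char (0 : Int)          -- my_dict.setdefault(char, 0)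
      PySem.Dict.insert d char (PySem.Dict.getD d char 0 + 1)) -- my_dict[char] = my_dict[char] + 1
    PySem.Dict.empty
  if number ∈ PySem.Dict.values d then 1 else 0

-- ===== PORT B =====
-- the 'for i, ch in enumerate(s)' loop of Source B, carrying the run accumulator;
-- the boundary test 'i+1 == len(s) or s[i+1] != ch' reads the rest of the list
def scanRuns (number : Int) : List Char → Int → Bool
  | [], _ => false
  | c :: rest, run =>
    let run := run + 1
    if (match rest with | [] => true | c' :: _ => c' ≠ c) then
      if run == number then true else scanRuns number rest 0
    else scanRuns number rest run

def check_characters_alt (line : String) (number : Int) : Int :=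
  if scanRuns number (PySem.List.sorted line.toList (fun c => c) false) 0 then 1 else 0

-- ===== PRECONDITION & SPEC =====
def Spec_check_characters (line : String) (number : Int) (out : Int) : Prop := out = check_characters_alt line number
instance (line : String) (number : Int) (out : Int) : Decidable (Spec_check_characters line number out) := by unfold Spec_check_characters; infer_instance

-- ===== CLAIM (what is proved, stated in full; the proofs are below) =====
def Claim_equal_check_characters : Prop := ∀ (line : String) (number : Int), Dom_check_characters line number → Spec_check_characters line number (check_characters line number)

-- ===== LEMMAS AND PROOFS =====

-- A's loop body (setdefault then overwrite) is the standard counter step.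
lemma step_eq (d : PySem.Dict Char Int) (c : Char) :
    (let d' := PySem.Dict.setdefault d c (0 : Int)
     PySem.Dict.insert d' c (PySem.Dict.getD d' c 0 + 1))
    = PySem.Dict.insert d c (PySem.Dict.getD d c 0 + 1) := by
  show PySem.Dict.insert (PySem.Dict.setdefault d c 0) c
        (PySem.Dict.getD (PySem.Dict.setdefault d c 0) c 0 + 1)
      = PySem.Dict.insert d c (PySem.Dict.getD d c 0 + 1)
  rw [PySem.Dict.getD_setdefault_self]
  by_cases h : PySem.Dict.contains d c = true
  · rw [PySem.Dict.setdefault_of_contains d 0 h]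
  · rw [PySem.Dict.setdefault_of_not_contains d 0 (by simpa using h),
        PySem.Dict.insert_insert_self]

lemma fold_eq_counter (l : List Char) :
    l.foldl (fun d char =>
        let d := PySem.Dict.setdefault d char (0 : Int)
        PySem.Dict.insert d char (PySem.Dict.getD d char 0 + 1)) PySem.Dict.empty
    = PySem.Dict.counter l := by
  rw [show (fun (d : PySem.Dict Char Int) char =>
        let d := PySem.Dict.setdefault d char (0 : Int)
        PySem.Dict.insert d char (PySem.Dict.getD d char 0 + 1))
      = (fun d char => PySem.Dict.insert d char (PySem.Dict.getD d char 0 + 1))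
    from funext fun d => funext fun c => step_eq d c]
  exact PySem.Dict.foldl_insert_getD_add_one_eq_counter l

-- A's test is: some character of l occurs exactly `number` times
lemma A_cond_iff (l : List Char) (number : Int) :
    (number ∈ PySem.Dict.values (PySem.Dict.counter l))
    ↔ (∃ c ∈ l, (l.count c : Int) = number) := by
  have hv : PySem.Dict.values (PySem.Dict.counter l)
      = (PySem.Set.ofList l).map (fun k => (l.count k : Int)) := by
    simp only [PySem.Dict.values, PySem.Dict.items_counter, List.map_map]
    rfl
  rw [hv]
  simp only [List.mem_map, PySem.Set.mem_ofList]

-- scanRuns over a leading block of k copies of c (the rest not starting with c)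
lemma scanRuns_replicate (number : Int) (c : Char) :
    ∀ (k : Nat), 0 < k → ∀ (t : List Char) (run : Int),
      (∀ c' t', t = c' :: t' → c' ≠ c) →
      scanRuns number (List.replicate k c ++ t) run
        = (if run + k == number then true else scanRuns number t 0) := by
  intro k
  induction k with
  | zero => intro h; omega
  | succ k ih =>
    intro _ t run ht
    rcases Nat.eq_zero_or_pos k with hk | hk
    · subst hk
      have h1 : List.replicate 1 c ++ t = c :: t := by simp
      rw [h1]
      cases t with
      | nil =>
        show scanRuns number [c] run = _
        simp only [scanRuns]
        norm_num
      | cons c' t' =>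
        have hne : c' ≠ c := ht c' t' rfl
        simp [scanRuns, hne]
    · have : List.replicate (k+1) c ++ t = c :: (List.replicate k c ++ t) := by
        simp [List.replicate_succ]
      rw [this]
      have hhead : ∃ u, List.replicate k c ++ t = c :: u := by
        cases k with
        | zero => omega
        | succ m => exact ⟨List.replicate m c ++ t, by simp [List.replicate_succ]⟩
      obtain ⟨u, hu⟩ := hhead
      rw [hu]
      have hstep : scanRuns number (c :: c :: u) run = scanRuns number (c :: u) (run + 1) := by
        simp [scanRuns]
      rw [hstep, ← hu, ih hk t (run + 1) ht]
      have harith : run + 1 + (k : Int) = run + ((k : Nat) + 1 : Nat) := by push_cast; ring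
      rw [harith]

-- after dropping the leading c-block of a sorted list, c never recurs
lemma dropWhile_no_c (c : Char) (t : List Char)
    (hp : (c :: t).Pairwise (· ≤ ·)) :
    c ∉ t.dropWhile (· == c) := by
  intro hmem
  have hsub : (t.dropWhile (· == c)).Sublist t := List.dropWhile_sublist _
  -- head of dropWhile is ≠ c; all elements after it are ≥ it and ≥ head > c? use pairwise on t
  have hpt : t.Pairwise (· ≤ ·) := hp.of_cons
  -- every element of dropWhile from its head position fails (== c) only for the head;
  -- instead: use that dropWhile's first element d satisfies d ≠ c, and sortedness gives d ≤ c impossible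
  cases hdw : t.dropWhile (· == c) with
  | nil => simp [hdw] at hmem
  | cons d u =>
    have hd := List.head?_dropWhile_not (· == c) t
    rw [hdw] at hd
    simp only [List.head?_cons] at hd
    have hdne : d ≠ c := by simpa using hd
    rw [hdw] at hmem
    -- c ∈ d :: u; c ≠ d so c ∈ u; pairwise sorted gives d ≤ c; also all elems of t before d are = c so c ≤ d
    have hcu : c ∈ u := by
      rcases List.mem_cons.mp hmem with h | h
      · exact absurd h.symm hdne
      · exact h
    -- d ≤ c from pairwise on (d :: u) which is a sublist of t
    have hsorted_du : (d :: u).Pairwise (· ≤ ·) := by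
      rw [hdw] at hsub; exact hpt.sublist hsub
    have hdc : d ≤ c := (List.pairwise_cons.mp hsorted_du).1 c hcu
    -- c ≤ d: d ∈ t and pairwise on c :: t gives c ≤ d
    have hdt : d ∈ t := by
      rw [hdw] at hsub
      exact hsub.mem (List.mem_cons_self ..)
    have hcd : c ≤ d := (List.pairwise_cons.mp hp).1 d hdt
    exact hdne (le_antisymm hdc hcd)

lemma takeWhile_replicate_count (c : Char) (t : List Char)
    (hp : (c :: t).Pairwise (· ≤ ·)) :
    (c :: t).takeWhile (· == c) = List.replicate ((c :: t).count c) c := by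
  have h1 : ∀ x ∈ (c :: t).takeWhile (· == c), x = c := by
    intro x hx
    simpa using List.mem_takeWhile_imp hx
  have hrep : (c :: t).takeWhile (· == c)
      = List.replicate (((c :: t).takeWhile (· == c)).length) c :=
    List.eq_replicate_of_mem h1
  rw [hrep]
  congr 1
  -- count c (c::t) = length of takeWhile
  have hsplit := List.takeWhile_append_dropWhile (p := (· == c)) (l := c :: t)
  have hcount : (c :: t).count c
      = ((c :: t).takeWhile (· == c)).count c + ((c :: t).dropWhile (· == c)).count c := by
    conv_lhs => rw [← hsplit]
    exact List.count_append ..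
  have hdrop0 : ((c :: t).dropWhile (· == c)).count c = 0 := by
    rw [List.count_eq_zero]
    have : (c :: t).dropWhile (· == c) = t.dropWhile (· == c) := by
      simp
    rw [this]
    exact dropWhile_no_c c t hp
  have htake : ((c :: t).takeWhile (· == c)).count c
      = ((c :: t).takeWhile (· == c)).length := by
    rw [List.count_eq_length]
    intro a ha; exact (h1 a ha).symm
  omega

-- main correctness of the run scan on a sorted list: some run length equals number
lemma scan_iff_aux (number : Int) :
    ∀ (n : Nat) (s : List Char), s.length ≤ n → s.Pairwise (· ≤ ·) →
      (scanRuns number s 0 = true ↔ ∃ c ∈ s, (s.count c : Int) = number) := by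
  intro n
  induction n with
  | zero =>
    intro s hlen _
    have : s = [] := List.eq_nil_of_length_eq_zero (Nat.le_zero.mp hlen)
    subst this
    simp [scanRuns]
  | succ n ih =>
    intro s hlen hp
    cases s with
    | nil => simp [scanRuns]
    | cons c t =>
      set t' := t.dropWhile (· == c) with ht'
      set k := (c :: t).count c with hk
      have hkpos : 0 < k := by
        rw [hk]; exact List.count_pos_iff.mpr (List.mem_cons_self ..)
      have hdecomp : c :: t = List.replicate k c ++ t' := by
        conv_lhs => rw [← List.takeWhile_append_dropWhile (p := (· == c)) (l := c :: t)]
        rw [takeWhile_replicate_count c t hp, ← hk]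
        congr 1
        simp [ht']
      have hno_c : c ∉ t' := dropWhile_no_c c t hp
      have hhead : ∀ c' u, t' = c' :: u → c' ≠ c := by
        intro c' u heq hc
        subst hc
        exact hno_c (heq ▸ List.mem_cons_self ..)
      have hlen' : t'.length ≤ n := by
        have h2 : (c :: t).length = k + t'.length := by
          rw [hdecomp]; simp
        simp only [List.length_cons] at h2 hlen
        omega
      have hp' : t'.Pairwise (· ≤ ·) := by
        have hsub : t'.Sublist (c :: t) := (List.dropWhile_sublist _).trans (List.sublist_cons_self _ _)
        exact hp.sublist hsub
      have hscan : scanRuns number (c :: t) 0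
          = (if (0 : Int) + k == number then true else scanRuns number t' 0) := by
        conv_lhs => rw [hdecomp]
        exact scanRuns_replicate number c k hkpos t' 0 hhead
      -- counts in s = replicate k c ++ t'
      have hcount_ne : ∀ c', c' ≠ c → (c :: t).count c' = t'.count c' := by
        intro c' hne
        rw [hdecomp, List.count_append, List.count_replicate]
        simp [Ne.symm hne]
      have hmem_ne : ∀ c', c' ≠ c → (c' ∈ (c :: t) ↔ c' ∈ t') := by
        intro c' hne
        rw [hdecomp]
        simp [List.mem_append, List.mem_replicate, hne]
      rw [hscan]
      by_cases hkn : ((0 : Int) + k == number) = true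
      · have hkn' : (k : Int) = number := by simpa using hkn
        rw [if_pos hkn]
        simp only [true_iff]
        exact ⟨c, List.mem_cons_self .., by rw [← hk]; exact hkn'⟩
      · have hkn' : (k : Int) ≠ number := by simpa using hkn
        rw [if_neg hkn, ih t' hlen' hp']
        constructor
        · rintro ⟨c', hc', hcnt⟩
          have hne : c' ≠ c := fun h => hno_c (h ▸ hc')
          refine ⟨c', (hmem_ne c' hne).mpr hc', ?_⟩
          rw [hcount_ne c' hne]
          exact hcnt
        · rintro ⟨c', hc', hcnt⟩
          by_cases hne : c' = c
          · subst hne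
            rw [← hk] at hcnt
            exact absurd hcnt hkn'
          · refine ⟨c', (hmem_ne c' hne).mp hc', ?_⟩
            rw [hcount_ne c' hne] at hcnt
            exact hcnt

lemma scan_iff (number : Int) (s : List Char) (hp : s.Pairwise (· ≤ ·)) :
    scanRuns number s 0 = true ↔ ∃ c ∈ s, (s.count c : Int) = number :=
  scan_iff_aux number s.length s le_rfl hp

-- ===== VERDICT (by name: the statement is the Claim_ definition above) =====
theorem check_characters_spec : Claim_equal_check_characters := by
  intro line number _
  unfold Spec_check_characters check_characters check_characters_alt
  rw [fold_eq_counter]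
  set l := line.toList
  set s := PySem.List.sorted l (fun c => c) false with hs
  have hperm : s.Perm l := PySem.List.sorted_perm ..
  have hp : s.Pairwise (· ≤ ·) := by
    have := PySem.List.sorted_pairwise (xs := l) (key := fun c => c)
    simpa using this
  have hiff : (number ∈ PySem.Dict.values (PySem.Dict.counter l))
      ↔ (scanRuns number s 0 = true) := by
    rw [A_cond_iff, scan_iff number s hp]
    constructor
    · rintro ⟨c, hc, hcnt⟩
      exact ⟨c, hperm.mem_iff.mpr hc, by rw [hperm.count_eq]; exact hcnt⟩
    · rintro ⟨c, hc, hcnt⟩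
      exact ⟨c, hperm.mem_iff.mp hc, by rw [← hperm.count_eq]; exact hcnt⟩
  by_cases h : number ∈ PySem.Dict.values (PySem.Dict.counter l)
  · rw [if_pos h, if_pos (hiff.mp h)]
  · rw [if_neg h, if_neg (fun hb => h (hiff.mpr hb))]
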